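-- pv_equiv track=rewrite | github.com/peterthenelson/mc | baxter/mc.py | _split_baxter
-- ===== SOURCE A (Python) =====
-- _BAXTER_INITIALS = sorted([
--     'p', 'ph', 'b', 'm',
--     't', 'th', 'd', 'n',
--     'k', 'kh', 'g', 'ng',
--     'x', 'h', 'y', "'",
--     'ts', 'tsh', 'dz', 's', 'z',
--     'tr', 'trh', 'dr', 'nr',
--     'tsr', 'tsrh', 'dzr', 'sr', 'zr',
--     'tsy', 'tsyh', 'dzy', 'sy', 'zy',
--     'l', 'ny'], key=len, reverse=True)
--
-- def _split_baxter(baxter):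
--   baxter = baxter.strip()
--   tone = 'ping'
--   if baxter[-1] == 'X':
--     baxter = baxter[:-1]
--     tone = 'shang'
--   elif baxter[-1] == 'H':
--     baxter = baxter[:-1]
--     tone = 'qu'
--   elif baxter[-1] in ['p', 't', 'k']:
--     tone = 'ru'
--   for init in _BAXTER_INITIALS:
--     if baxter.startswith(init):
--       final = baxter[len(init):]
--       #if final not in _BAXTER_FINALS:
--       #  raise ValueError('Invalid final: %s' % final)
--       return init, final, tone
--   raise ValueError('Syllable %s does not start with a valid initial' % baxter)
-- ===== SOURCE B (Python) =====
-- _BAXTER_INITIALS_SET = frozenset([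
--     'p', 'ph', 'b', 'm',
--     't', 'th', 'd', 'n',
--     'k', 'kh', 'g', 'ng',
--     'x', 'h', 'y', "'",
--     'ts', 'tsh', 'dz', 's', 'z',
--     'tr', 'trh', 'dr', 'nr',
--     'tsr', 'tsrh', 'dzr', 'sr', 'zr',
--     'tsy', 'tsyh', 'dzy', 'sy', 'zy',
--     'l', 'ny'])
-- # The initials set is PREFIX-CLOSED: every nonempty prefix of an initial is itself
-- # an initial.  So the longest matching initial can be found by extending the match
-- # one character at a time and stopping at the first prefix that is not an initial.
--
-- _TONE_MARKS = {'X': 'shang', 'H': 'qu'}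
--
-- def _split_baxter(baxter):
--   baxter = baxter.strip()
--   last = baxter[-1]
--   tone = _TONE_MARKS.get(last)
--   if tone is not None:
--     baxter = baxter[:-1]
--   elif last in ('p', 't', 'k'):
--     tone = 'ru'
--   else:
--     tone = 'ping'
--   best = 0
--   for i in range(len(baxter)):
--     if baxter[:i + 1] not in _BAXTER_INITIALS_SET:
--       break
--     best = i + 1
--   if best == 0:
--     raise ValueError('Syllable %s does not start with a valid initial' % baxter)
--   return baxter[:best], baxter[best:], tone
-- ===== Notes on version B (the rewrite author's own statement) =====
-- stated objective: alternative
-- what changed: Instead of scanning the length-sorted initials table with startswith, B exploits that the initials set is prefix-closed and finds the longest initial by a single left-to-right scan that extends the matched prefix one character at a time until the prefix is no longer in the set; the tone prologue is restructured around a tone-mark dict.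
import Mathlib
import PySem

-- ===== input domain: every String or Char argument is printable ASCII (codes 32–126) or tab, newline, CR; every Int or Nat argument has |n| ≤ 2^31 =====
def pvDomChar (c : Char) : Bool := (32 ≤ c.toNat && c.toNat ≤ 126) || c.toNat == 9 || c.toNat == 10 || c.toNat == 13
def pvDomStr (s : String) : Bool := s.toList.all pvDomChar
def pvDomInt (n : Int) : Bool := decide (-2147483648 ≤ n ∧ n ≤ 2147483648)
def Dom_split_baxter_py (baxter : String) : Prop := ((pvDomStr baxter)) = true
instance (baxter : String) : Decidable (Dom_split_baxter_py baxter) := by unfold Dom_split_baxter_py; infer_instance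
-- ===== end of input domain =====

-- B replaces A's startswith scan over the length-sorted initials table by a single left-to-right
-- scan that extends the matched prefix one character at a time (the initials set is prefix-closed),
-- with the tone prologue restructured around a tone-mark dict (alternative decomposition, same cost).

-- ===== PORT A =====
-- _BAXTER_INITIALS after Python's stable `sorted(..., key=len, reverse=True)`
def pvInitialsTable : List (List Char) :=
  [['t','s','r','h'], ['t','s','y','h'],
   ['t','s','h'], ['t','r','h'], ['t','s','r'], ['d','z','r'], ['t','s','y'], ['d','z','y'],
   ['p','h'], ['t','h'], ['k','h'], ['n','g'], ['t','s'], ['d','z'], ['t','r'],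
   ['d','r'], ['n','r'], ['s','r'], ['z','r'], ['s','y'], ['z','y'], ['n','y'],
   ['p'], ['b'], ['m'], ['t'], ['d'], ['n'], ['k'], ['g'], ['x'], ['h'], ['y'],
   ['\''], ['s'], ['z'], ['l']]

-- `for init in _BAXTER_INITIALS: if baxter.startswith(init): return init, baxter[len(init):]`
def pvLoopA : List (List Char) → List Char → Option (List Char × List Char)
  | [], _ => none
  | init :: rest, b =>
    if PySem.Chars.startswith b init then
      some (init, PySem.List.slice b (some (init.length : Int)) none)
    else pvLoopA rest b

def split_baxter_py (baxter : String) : String × String × String :=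
  let s := (PySem.Str.strip baxter).toList
  match PySem.List.pyGet? s (-1) with
  | none => ("", "", "")  -- Python raises IndexError here; excluded by Pre_
  | some c =>
    let bt : List Char × String :=
      if c = 'X' then (PySem.List.slice s none (some (-1)), "shang")
      else if c = 'H' then (PySem.List.slice s none (some (-1)), "qu")
      else if c ∈ ['p', 't', 'k'] then (s, "ru")
      else (s, "ping")
    match pvLoopA pvInitialsTable bt.1 with
    | some (init, fin) => (String.ofList init, String.ofList fin, bt.2)
    | none => ("", "", "")  -- Python raises ValueError here; excluded by Pre_

-- ===== PORT B =====
-- _BAXTER_INITIALS_SET = frozenset([...]) (source order of the literal list)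
def pvInitialsSetB : PySem.Set (List Char) :=
  PySem.Set.ofList
    [['p'], ['p','h'], ['b'], ['m'],
     ['t'], ['t','h'], ['d'], ['n'],
     ['k'], ['k','h'], ['g'], ['n','g'],
     ['x'], ['h'], ['y'], ['\''],
     ['t','s'], ['t','s','h'], ['d','z'], ['s'], ['z'],
     ['t','r'], ['t','r','h'], ['d','r'], ['n','r'],
     ['t','s','r'], ['t','s','r','h'], ['d','z','r'], ['s','r'], ['z','r'],
     ['t','s','y'], ['t','s','y','h'], ['d','z','y'], ['s','y'], ['z','y'],
     ['l'], ['n','y']]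

-- _TONE_MARKS = {'X': 'shang', 'H': 'qu'}
def pvToneMarks : PySem.Dict Char String := PySem.Dict.ofList [('X', "shang"), ('H', "qu")]

-- `for i in range(len(baxter)): if baxter[:i+1] not in _BAXTER_INITIALS_SET: break; best = i+1`
def pvWalk (b : List Char) : List Int → Int → Int
  | [], best => best
  | i :: rest, best =>
    if PySem.Set.contains pvInitialsSetB (PySem.List.slice b none (some (i + 1))) then
      pvWalk b rest (i + 1)
    else best

def split_baxter_py_alt (baxter : String) : String × String × String :=
  let s := (PySem.Str.strip baxter).toList
  match PySem.List.pyGet? s (-1) with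
  | none => ("", "", "")  -- Python raises IndexError here; excluded by Pre_
  | some last =>
    let bt : List Char × String :=
      match PySem.Dict.get? pvToneMarks last with
      | some t => (PySem.List.slice s none (some (-1)), t)
      | none => (s, if last ∈ ['p', 't', 'k'] then "ru" else "ping")
    let best := pvWalk bt.1 (PySem.List.pyRange 0 (bt.1.length : Int) 1) 0
    if best = 0 then ("", "", "")  -- Python raises ValueError here; excluded by Pre_
    else (String.ofList (PySem.List.slice bt.1 none (some best)),
          String.ofList (PySem.List.slice bt.1 (some best) none), bt.2)

-- ===== PRECONDITION & SPEC =====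
-- Pre_ excludes exactly the inputs on which A raises: IndexError when the stripped string is
-- empty, and ValueError when (after removing a trailing tone letter X/H) no valid initial is a
-- prefix of the syllable.
def Pre_split_baxter_py (baxter : String) : Prop :=
  let s := (PySem.Str.strip baxter).toList
  s ≠ [] ∧
    (∃ init ∈ pvInitialsTable,
      init <+: (if s.getLast? = some 'X' ∨ s.getLast? = some 'H' then s.dropLast else s))
instance (baxter : String) : Decidable (Pre_split_baxter_py baxter) := by
  unfold Pre_split_baxter_py; infer_instance
def pvWitness_split_baxter_py : String := "tsyhaX"

def Spec_split_baxter_py (baxter : String) (out : String × String × String) : Prop := out = split_baxter_py_alt baxter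
instance (baxter : String) (out : String × String × String) : Decidable (Spec_split_baxter_py baxter out) := by unfold Spec_split_baxter_py; infer_instance

-- ===== CLAIM (what is proved, stated in full; the proofs are below) =====
def Claim_equal_split_baxter_py : Prop := ∀ (baxter : String), Dom_split_baxter_py baxter → Pre_split_baxter_py baxter → Spec_split_baxter_py baxter (split_baxter_py baxter)

-- ===== LEMMAS AND PROOFS =====

-- the table's four length groups, in table order
def pvG4 : List (List Char) := [['t','s','r','h'], ['t','s','y','h']]
def pvG3 : List (List Char) :=
  [['t','s','h'], ['t','r','h'], ['t','s','r'], ['d','z','r'], ['t','s','y'], ['d','z','y']]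
def pvG2 : List (List Char) :=
  [['p','h'], ['t','h'], ['k','h'], ['n','g'], ['t','s'], ['d','z'], ['t','r'],
   ['d','r'], ['n','r'], ['s','r'], ['z','r'], ['s','y'], ['z','y'], ['n','y']]
def pvG1 : List (List Char) :=
  [['p'], ['b'], ['m'], ['t'], ['d'], ['n'], ['k'], ['g'], ['x'], ['h'], ['y'],
   ['\''], ['s'], ['z'], ['l']]

theorem pvTable_eq : pvInitialsTable = pvG4 ++ pvG3 ++ pvG2 ++ pvG1 := by decide

theorem pvLoopA_append (g h : List (List Char)) (b : List Char) :
    pvLoopA (g ++ h) b = (pvLoopA g b).or (pvLoopA h b) := by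
  induction g with
  | nil => simp [pvLoopA]
  | cons i rest ih =>
    simp only [List.cons_append, pvLoopA]
    split <;> simp [ih]

theorem pvLoopA_uniform (L : Nat) (g : List (List Char)) (hg : ∀ i ∈ g, i.length = L)
    (b : List Char) :
    pvLoopA g b = if b.take L ∈ g then some (b.take L, b.drop L) else none := by
  induction g with
  | nil => simp [pvLoopA]
  | cons i rest ih =>
    have hi : i.length = L := hg i (by simp)
    have hpre : (PySem.Chars.startswith b i = true) ↔ b.take L = i := by
      rw [PySem.Chars.startswith_iff, List.prefix_iff_eq_take, hi, eq_comm]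
    by_cases h : b.take L = i
    · simp [pvLoopA, hpre.mpr h, h, PySem.List.slice_from_natCast, hi]
    · have : ¬ (PySem.Chars.startswith b i = true) := fun hc => h (hpre.mp hc)
      simp only [pvLoopA, this, if_neg, ih (fun j hj => hg j (by simp [hj])), Bool.not_eq_true] at *
      simp [List.mem_cons, h]

theorem pvG4_len : ∀ i ∈ pvG4, i.length = 4 := by decide
theorem pvG3_len : ∀ i ∈ pvG3, i.length = 3 := by decide
theorem pvG2_len : ∀ i ∈ pvG2, i.length = 2 := by decide
theorem pvG1_len : ∀ i ∈ pvG1, i.length = 1 := by decide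

theorem not_mem_pvG4 (x : List Char) (h : x.length ≠ 4) : x ∉ pvG4 :=
  fun hm => h (pvG4_len x hm)
theorem not_mem_pvG3 (x : List Char) (h : x.length ≠ 3) : x ∉ pvG3 :=
  fun hm => h (pvG3_len x hm)
theorem not_mem_pvG2 (x : List Char) (h : x.length ≠ 2) : x ∉ pvG2 :=
  fun hm => h (pvG2_len x hm)
theorem not_mem_pvG1 (x : List Char) (h : x.length ≠ 1) : x ∉ pvG1 :=
  fun hm => h (pvG1_len x hm)

-- A's loop is the longest-match cascade over the four length groups
theorem pvLoopA_cascade (b : List Char) :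
    pvLoopA pvInitialsTable b =
      (if b.take 4 ∈ pvG4 then some (b.take 4, b.drop 4) else
       if b.take 3 ∈ pvG3 then some (b.take 3, b.drop 3) else
       if b.take 2 ∈ pvG2 then some (b.take 2, b.drop 2) else
       if b.take 1 ∈ pvG1 then some (b.take 1, b.drop 1) else none) := by
  rw [pvTable_eq, pvLoopA_append, pvLoopA_append, pvLoopA_append,
      pvLoopA_uniform 4 pvG4 pvG4_len, pvLoopA_uniform 3 pvG3 pvG3_len,
      pvLoopA_uniform 2 pvG2 pvG2_len, pvLoopA_uniform 1 pvG1 pvG1_len]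
  by_cases c4 : b.take 4 ∈ pvG4 <;> by_cases c3 : b.take 3 ∈ pvG3 <;>
    by_cases c2 : b.take 2 ∈ pvG2 <;> by_cases c1 : b.take 1 ∈ pvG1 <;>
    simp [c4, c3, c2, c1]

-- B's set, split by length
theorem pvSetB_perm : List.Perm pvInitialsSetB (pvG4 ++ pvG3 ++ pvG2 ++ pvG1) := by decide

theorem mem_pvSetB (x : List Char) :
    x ∈ pvInitialsSetB ↔ (x ∈ pvG4 ∨ x ∈ pvG3 ∨ x ∈ pvG2 ∨ x ∈ pvG1) := by
  rw [pvSetB_perm.mem_iff]; simp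

theorem pvMem4 (x : List Char) (hx : x.length = 4) :
    x ∈ pvInitialsSetB ↔ x ∈ pvG4 := by
  rw [mem_pvSetB]
  refine ⟨fun h => ?_, fun h => Or.inl h⟩
  rcases h with h | h | h | h
  · exact h
  · exact absurd h (not_mem_pvG3 x (by omega))
  · exact absurd h (not_mem_pvG2 x (by omega))
  · exact absurd h (not_mem_pvG1 x (by omega))

theorem pvMem3 (x : List Char) (hx : x.length = 3) :
    x ∈ pvInitialsSetB ↔ x ∈ pvG3 := by
  rw [mem_pvSetB]
  refine ⟨fun h => ?_, fun h => Or.inr (Or.inl h)⟩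
  rcases h with h | h | h | h
  · exact absurd h (not_mem_pvG4 x (by omega))
  · exact h
  · exact absurd h (not_mem_pvG2 x (by omega))
  · exact absurd h (not_mem_pvG1 x (by omega))

theorem pvMem2 (x : List Char) (hx : x.length = 2) :
    x ∈ pvInitialsSetB ↔ x ∈ pvG2 := by
  rw [mem_pvSetB]
  refine ⟨fun h => ?_, fun h => Or.inr (Or.inr (Or.inl h))⟩
  rcases h with h | h | h | h
  · exact absurd h (not_mem_pvG4 x (by omega))
  · exact absurd h (not_mem_pvG3 x (by omega))
  · exact h
  · exact absurd h (not_mem_pvG1 x (by omega))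

theorem pvMem1 (x : List Char) (hx : x.length = 1) :
    x ∈ pvInitialsSetB ↔ x ∈ pvG1 := by
  rw [mem_pvSetB]
  refine ⟨fun h => ?_, fun h => Or.inr (Or.inr (Or.inr h))⟩
  rcases h with h | h | h | h
  · exact absurd h (not_mem_pvG4 x (by omega))
  · exact absurd h (not_mem_pvG3 x (by omega))
  · exact absurd h (not_mem_pvG2 x (by omega))
  · exact h

theorem pvMem_long (x : List Char) (hx : 5 ≤ x.length) : x ∉ pvInitialsSetB := by
  intro hc
  rcases (mem_pvSetB x).1 hc with h | h | h | h
  · exact absurd h (not_mem_pvG4 x (by omega))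
  · exact absurd h (not_mem_pvG3 x (by omega))
  · exact absurd h (not_mem_pvG2 x (by omega))
  · exact absurd h (not_mem_pvG1 x (by omega))

-- prefix-closure of the initials: a longer match implies the shorter prefixes are initials too
theorem pvClosure43 : ∀ x ∈ pvG4, x.take 3 ∈ pvG3 := by decide
theorem pvClosure32 : ∀ x ∈ pvG3, x.take 2 ∈ pvG2 := by decide
theorem pvClosure21 : ∀ x ∈ pvG2, x.take 1 ∈ pvG1 := by decide

theorem pvTake_take (b : List Char) (j k : Nat) (h : j ≤ k) :
    (b.take k).take j = b.take j := by
  rw [List.take_take, min_eq_left h]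

theorem pvS1 (b : List Char) : PySem.List.slice b none (some 1) = b.take 1 := by simp [pysem]
theorem pvS2 (b : List Char) : PySem.List.slice b none (some 2) = b.take 2 := by simp [pysem]
theorem pvS3 (b : List Char) : PySem.List.slice b none (some 3) = b.take 3 := by simp [pysem]
theorem pvS4 (b : List Char) : PySem.List.slice b none (some 4) = b.take 4 := by simp [pysem]
theorem pvS5 (b : List Char) : PySem.List.slice b none (some 5) = b.take 5 := by simp [pysem]
theorem pvAdd1 : ((0 : Int) + 1 = 1) ∧ ((1 : Int) + 1 = 2) ∧ ((2 : Int) + 1 = 3) ∧ ((3 : Int) + 1 = 4) ∧ ((4 : Int) + 1 = 5) := by norm_num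

-- B's walk computes the length of the longest initial prefix (as the cascade does)
set_option maxHeartbeats 1000000 in
theorem pvWalk_eq (b : List Char) :
    pvWalk b (PySem.List.pyRange 0 (b.length : Int) 1) 0 =
      (if b.take 4 ∈ pvG4 then 4 else if b.take 3 ∈ pvG3 then 3
       else if b.take 2 ∈ pvG2 then 2 else if b.take 1 ∈ pvG1 then 1 else (0 : Int)) := by
  by_cases h5 : 5 ≤ b.length
  · have r : PySem.List.pyRange 0 (b.length : Int) 1 =
        [0, 1, 2, 3, 4] ++ PySem.List.pyRange 5 (b.length : Int) 1 := by
      rw [PySem.List.pyRange_one_append 0 5 (b.length : Int) (by norm_num) (by exact_mod_cast h5)]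
      norm_num [show PySem.List.pyRange 0 5 1 = [0, 1, 2, 3, 4] from by decide]
    rw [r]
    have l1 : (b.take 1).length = 1 := by simp [List.length_take]; omega
    have l2 : (b.take 2).length = 2 := by simp [List.length_take]; omega
    have l3 : (b.take 3).length = 3 := by simp [List.length_take]; omega
    have l4 : (b.take 4).length = 4 := by simp [List.length_take]; omega
    have n5 : b.take 5 ∉ pvInitialsSetB :=
      pvMem_long _ (by simp [List.length_take]; omega)
    simp only [List.cons_append, List.nil_append, pvWalk, pvAdd1, pvS1, pvS2, pvS3, pvS4, pvS5]
    by_cases m4 : b.take 4 ∈ pvG4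
    · have m3 : b.take 3 ∈ pvG3 := pvTake_take b 3 4 (by omega) ▸ pvClosure43 _ m4
      have m2 : b.take 2 ∈ pvG2 := pvTake_take b 2 3 (by omega) ▸ pvClosure32 _ m3
      have m1 : b.take 1 ∈ pvG1 := pvTake_take b 1 2 (by omega) ▸ pvClosure21 _ m2
      simp [pvMem1 _ l1, pvMem2 _ l2, pvMem3 _ l3, pvMem4 _ l4, m1, m2, m3, m4, n5]
    · by_cases m3 : b.take 3 ∈ pvG3
      · have m2 : b.take 2 ∈ pvG2 := pvTake_take b 2 3 (by omega) ▸ pvClosure32 _ m3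
        have m1 : b.take 1 ∈ pvG1 := pvTake_take b 1 2 (by omega) ▸ pvClosure21 _ m2
        simp [pvMem1 _ l1, pvMem2 _ l2, pvMem3 _ l3, pvMem4 _ l4, m1, m2, m3, m4]
      · by_cases m2 : b.take 2 ∈ pvG2
        · have m1 : b.take 1 ∈ pvG1 := pvTake_take b 1 2 (by omega) ▸ pvClosure21 _ m2
          simp [pvMem1 _ l1, pvMem2 _ l2, pvMem3 _ l3, m1, m2, m3, m4]
        · by_cases m1 : b.take 1 ∈ pvG1
          · simp [pvMem1 _ l1, pvMem2 _ l2, m1, m2, m3, m4]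
          · simp [pvMem1 _ l1, m1, m2, m3, m4]
  · have hle : b.length = 0 ∨ b.length = 1 ∨ b.length = 2 ∨ b.length = 3 ∨ b.length = 4 := by
      omega
    rcases hle with h | h | h | h | h
    · have hb : b = [] := List.eq_nil_of_length_eq_zero h
      subst hb
      decide
    · rw [h]
      rw [show PySem.List.pyRange 0 ((1 : Nat) : Int) 1 = [0] from by decide]
      have l1 : (b.take 1).length = 1 := by simp [List.length_take]; omega
      have t2 : b.take 2 = b := List.take_of_length_le (by omega)
      have nn2 : b ∉ pvG2 := not_mem_pvG2 b (by omega)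
      have t3 : b.take 3 = b := List.take_of_length_le (by omega)
      have nn3 : b ∉ pvG3 := not_mem_pvG3 b (by omega)
      have t4 : b.take 4 = b := List.take_of_length_le (by omega)
      have nn4 : b ∉ pvG4 := not_mem_pvG4 b (by omega)
      simp only [pvWalk, pvAdd1, pvS1]
      by_cases m1 : b.take 1 ∈ pvG1
      · simp [pvMem1 _ l1, m1, t2, nn2, t3, nn3, t4, nn4]
      · simp [pvMem1 _ l1, m1, t2, nn2, t3, nn3, t4, nn4]
    · rw [h]
      rw [show PySem.List.pyRange 0 ((2 : Nat) : Int) 1 = [0, 1] from by decide]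
      have l1 : (b.take 1).length = 1 := by simp [List.length_take]; omega
      have l2 : (b.take 2).length = 2 := by simp [List.length_take]; omega
      have t3 : b.take 3 = b := List.take_of_length_le (by omega)
      have nn3 : b ∉ pvG3 := not_mem_pvG3 b (by omega)
      have t4 : b.take 4 = b := List.take_of_length_le (by omega)
      have nn4 : b ∉ pvG4 := not_mem_pvG4 b (by omega)
      simp only [pvWalk, pvAdd1, pvS1, pvS2]
      by_cases m2 : b.take 2 ∈ pvG2
      · have m1 : b.take 1 ∈ pvG1 := pvTake_take b 1 2 (by omega) ▸ pvClosure21 _ m2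
        simp [pvMem1 _ l1, pvMem2 _ l2, m1, m2, t3, nn3, t4, nn4]
      · by_cases m1 : b.take 1 ∈ pvG1
        · simp [pvMem1 _ l1, pvMem2 _ l2, m1, m2, t3, nn3, t4, nn4]
        · simp [pvMem1 _ l1, m1, m2, t3, nn3, t4, nn4]
    · rw [h]
      rw [show PySem.List.pyRange 0 ((3 : Nat) : Int) 1 = [0, 1, 2] from by decide]
      have l1 : (b.take 1).length = 1 := by simp [List.length_take]; omega
      have l2 : (b.take 2).length = 2 := by simp [List.length_take]; omega
      have l3 : (b.take 3).length = 3 := by simp [List.length_take]; omega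
      have t4 : b.take 4 = b := List.take_of_length_le (by omega)
      have nn4 : b ∉ pvG4 := not_mem_pvG4 b (by omega)
      simp only [pvWalk, pvAdd1, pvS1, pvS2, pvS3]
      by_cases m3 : b.take 3 ∈ pvG3
      · have m2 : b.take 2 ∈ pvG2 := pvTake_take b 2 3 (by omega) ▸ pvClosure32 _ m3
        have m1 : b.take 1 ∈ pvG1 := pvTake_take b 1 2 (by omega) ▸ pvClosure21 _ m2
        simp [pvMem1 _ l1, pvMem2 _ l2, pvMem3 _ l3, m1, m2, m3, t4, nn4]
      · by_cases m2 : b.take 2 ∈ pvG2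
        · have m1 : b.take 1 ∈ pvG1 := pvTake_take b 1 2 (by omega) ▸ pvClosure21 _ m2
          simp [pvMem1 _ l1, pvMem2 _ l2, pvMem3 _ l3, m1, m2, m3, t4, nn4]
        · by_cases m1 : b.take 1 ∈ pvG1
          · simp [pvMem1 _ l1, pvMem2 _ l2, m1, m2, m3, t4, nn4]
          · simp [pvMem1 _ l1, m1, m2, m3, t4, nn4]
    · rw [h]
      rw [show PySem.List.pyRange 0 ((4 : Nat) : Int) 1 = [0, 1, 2, 3] from by decide]
      have l1 : (b.take 1).length = 1 := by simp [List.length_take]; omega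
      have l2 : (b.take 2).length = 2 := by simp [List.length_take]; omega
      have l3 : (b.take 3).length = 3 := by simp [List.length_take]; omega
      have l4 : (b.take 4).length = 4 := by simp [List.length_take]; omega
      simp only [pvWalk, pvAdd1, pvS1, pvS2, pvS3, pvS4]
      by_cases m4 : b.take 4 ∈ pvG4
      · have m3 : b.take 3 ∈ pvG3 := pvTake_take b 3 4 (by omega) ▸ pvClosure43 _ m4
        have m2 : b.take 2 ∈ pvG2 := pvTake_take b 2 3 (by omega) ▸ pvClosure32 _ m3
        have m1 : b.take 1 ∈ pvG1 := pvTake_take b 1 2 (by omega) ▸ pvClosure21 _ m2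
        simp [pvMem1 _ l1, pvMem2 _ l2, pvMem3 _ l3, pvMem4 _ l4, m1, m2, m3, m4]
      · by_cases m3 : b.take 3 ∈ pvG3
        · have m2 : b.take 2 ∈ pvG2 := pvTake_take b 2 3 (by omega) ▸ pvClosure32 _ m3
          have m1 : b.take 1 ∈ pvG1 := pvTake_take b 1 2 (by omega) ▸ pvClosure21 _ m2
          simp [pvMem1 _ l1, pvMem2 _ l2, pvMem3 _ l3, pvMem4 _ l4, m1, m2, m3, m4]
        · by_cases m2 : b.take 2 ∈ pvG2
          · have m1 : b.take 1 ∈ pvG1 := pvTake_take b 1 2 (by omega) ▸ pvClosure21 _ m2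
            simp [pvMem1 _ l1, pvMem2 _ l2, pvMem3 _ l3, m1, m2, m3, m4]
          · by_cases m1 : b.take 1 ∈ pvG1
            · simp [pvMem1 _ l1, pvMem2 _ l2, m1, m2, m3, m4]
            · simp [pvMem1 _ l1, m1, m2, m3, m4]

-- the common shape of the two results
theorem pvKey (b : List Char) (tone : String) :
    (match pvLoopA pvInitialsTable b with
     | some (init, fin) => (String.ofList init, String.ofList fin, tone)
     | none => ("", "", "")) =
    (let best := pvWalk b (PySem.List.pyRange 0 (b.length : Int) 1) 0
     if best = 0 then ("", "", "")
     else (String.ofList (PySem.List.slice b none (some best)),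
           String.ofList (PySem.List.slice b (some best) none), tone)) := by
  rw [pvLoopA_cascade, pvWalk_eq]
  by_cases c4 : b.take 4 ∈ pvG4
  · simp [c4, PySem.List.slice_to, PySem.List.slice_from]
  · by_cases c3 : b.take 3 ∈ pvG3
    · simp [c4, c3, PySem.List.slice_to, PySem.List.slice_from]
    · by_cases c2 : b.take 2 ∈ pvG2
      · simp [c4, c3, c2, PySem.List.slice_to, PySem.List.slice_from]
      · by_cases c1 : b.take 1 ∈ pvG1
        · simp [c4, c3, c2, c1, PySem.List.slice_to, PySem.List.slice_from]
        · simp [c4, c3, c2, c1]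

-- the two tone prologues agree
theorem pvTone_eq (c : Char) (s : List Char) :
    (if c = 'X' then (PySem.List.slice s none (some (-1)), ("shang" : String))
     else if c = 'H' then (PySem.List.slice s none (some (-1)), "qu")
     else if c ∈ ['p', 't', 'k'] then (s, "ru")
     else (s, "ping")) =
    (match PySem.Dict.get? pvToneMarks c with
     | some t => (PySem.List.slice s none (some (-1)), t)
     | none => (s, if c ∈ ['p', 't', 'k'] then "ru" else "ping")) := by
  have hmk : pvToneMarks = PySem.Dict.mk [('X', "shang"), ('H', "qu")] := by rfl
  by_cases hX : c = 'X'
  · subst hX; simp [hmk, PySem.Dict.get?_mk_cons]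
  · by_cases hH : c = 'H'
    · subst hH; simp [hmk, PySem.Dict.get?_mk_cons]
    · have hn : PySem.Dict.get? pvToneMarks c = none := by
        simp [hmk, PySem.Dict.get?_mk_cons, beq_iff_eq, Ne.symm hX, Ne.symm hH]
        rfl
      rw [hn]
      by_cases hp : c ∈ ['p', 't', 'k'] <;> simp [hX, hH, hp]

theorem pvPorts_eq (baxter : String) :
    split_baxter_py baxter = split_baxter_py_alt baxter := by
  unfold split_baxter_py split_baxter_py_alt
  cases h : PySem.List.pyGet? (PySem.Str.strip baxter).toList (-1) with
  | none => simp only [h]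
  | some c =>
    simp only [h, ← pvTone_eq c]
    exact pvKey _ _

-- ===== VERDICT (by name: the statement is the Claim_ definition above) =====
theorem split_baxter_py_spec : Claim_equal_split_baxter_py := by
  intro baxter _ _
  unfold Spec_split_baxter_py
  exact pvPorts_eq baxter
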